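-- pv_equiv track=rewrite | github.com/sueszli/llvm-to-air | src/llvm_to_air.py | _replace_intrinsics
-- ===== SOURCE A (Python) =====
-- from typing import Dict, List, Set, Tuple
--
-- def _replace_intrinsics(line: str) -> Tuple[str, Set[str]]:
--     used_intr = set()
--     if "call" in line:
--         # replace llvm intrinsic calls with air equivalent
--         # llvm.exp.f32 -> air.exp.f32
--         math_ops = ["exp", "log", "sin", "cos", "sqrt", "ceil", "floor", "fabs", "pow", "tanh", "fma", "trunc", "round"]
--         for op in math_ops:
--             llvm_intr = f"@llvm.{op}.f32"
--             air_intr = f"@air.{op}.f32"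
--             if llvm_intr in line:
--                 line = line.replace(llvm_intr, air_intr)
--                 used_intr.add(air_intr)
--
--         # Special mappings: minnum->fmin, maxnum->fmax
--         if "@llvm.minnum.f32" in line:
--             line = line.replace("@llvm.minnum.f32", "@air.fmin.f32")
--             used_intr.add("@air.fmin.f32")
--         if "@llvm.maxnum.f32" in line:
--             line = line.replace("@llvm.maxnum.f32", "@air.fmax.f32")
--             used_intr.add("@air.fmax.f32")
--     return line, used_intr
-- ===== SOURCE B (Python) =====
-- import re
-- from typing import Tuple, Set
--
-- _AIR = {
--     "@llvm.exp.f32": "@air.exp.f32",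
--     "@llvm.log.f32": "@air.log.f32",
--     "@llvm.sin.f32": "@air.sin.f32",
--     "@llvm.cos.f32": "@air.cos.f32",
--     "@llvm.sqrt.f32": "@air.sqrt.f32",
--     "@llvm.ceil.f32": "@air.ceil.f32",
--     "@llvm.floor.f32": "@air.floor.f32",
--     "@llvm.fabs.f32": "@air.fabs.f32",
--     "@llvm.pow.f32": "@air.pow.f32",
--     "@llvm.tanh.f32": "@air.tanh.f32",
--     "@llvm.fma.f32": "@air.fma.f32",
--     "@llvm.trunc.f32": "@air.trunc.f32",
--     "@llvm.round.f32": "@air.round.f32",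
--     "@llvm.minnum.f32": "@air.fmin.f32",
--     "@llvm.maxnum.f32": "@air.fmax.f32",
-- }
-- _RX = re.compile("|".join(re.escape(k) for k in _AIR))
--
-- def _replace_intrinsics(line: str) -> Tuple[str, Set[str]]:
--     if "call" not in line:
--         return line, set()
--     used = {air for llvm, air in _AIR.items() if llvm in line}
--     return _RX.sub(lambda m: _AIR[m.group(0)], line), used
-- ===== Notes on version B (the rewrite author's own statement) =====
-- stated objective: alternative
-- what changed: A runs fifteen sequential whole-line str.replace passes (plus two special-cased intrinsics) mutating the line as it goes; B builds one llvm->air mapping, rewrites the line in a single left-to-right regex-alternation pass, and collects the used air names in one pass over the mapping against the original line.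
import Mathlib
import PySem

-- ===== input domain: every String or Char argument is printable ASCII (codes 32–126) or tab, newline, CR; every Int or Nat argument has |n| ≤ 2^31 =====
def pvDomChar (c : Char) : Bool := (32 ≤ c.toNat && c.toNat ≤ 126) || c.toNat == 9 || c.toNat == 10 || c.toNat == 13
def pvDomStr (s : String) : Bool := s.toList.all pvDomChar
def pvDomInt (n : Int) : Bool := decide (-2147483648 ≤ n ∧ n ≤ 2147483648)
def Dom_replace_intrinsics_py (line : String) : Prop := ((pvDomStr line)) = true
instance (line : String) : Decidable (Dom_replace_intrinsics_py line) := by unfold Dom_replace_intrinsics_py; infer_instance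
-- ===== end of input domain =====

-- B replaces A's fifteen sequential whole-line str.replace passes by one precomputed llvm->air
-- table, a single left-to-right scan of the line (one regex sub in Python), and one table pass
-- collecting the used intrinsics from the original line; objective: alternative (single-pass).


-- ===== PORT A =====
def pvMathOpsA : List String :=
  ["exp", "log", "sin", "cos", "sqrt", "ceil", "floor", "fabs", "pow", "tanh", "fma", "trunc", "round"]

def replace_intrinsics_py (line : String) : String × List String :=
  let used : PySem.Set String := PySem.Set.empty
  if PySem.Str.isIn "call" line then
    let st := pvMathOpsA.foldl (fun (st : String × PySem.Set String) op =>
      if PySem.Str.isIn ("@llvm." ++ op ++ ".f32") st.1 then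
        (PySem.Str.replace st.1 ("@llvm." ++ op ++ ".f32") ("@air." ++ op ++ ".f32"),
          PySem.Set.add st.2 ("@air." ++ op ++ ".f32"))
      else st) (line, used)
    let st := if PySem.Str.isIn "@llvm.minnum.f32" st.1 then
        (PySem.Str.replace st.1 "@llvm.minnum.f32" "@air.fmin.f32", PySem.Set.add st.2 "@air.fmin.f32")
      else st
    let st := if PySem.Str.isIn "@llvm.maxnum.f32" st.1 then
        (PySem.Str.replace st.1 "@llvm.maxnum.f32" "@air.fmax.f32", PySem.Set.add st.2 "@air.fmax.f32")
      else st
    st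
  else (line, used)

-- ===== PORT B =====
-- module-level _AIR dict of Source B, in insertion order
def pvAirTable : List (String × String) :=
  [("@llvm.exp.f32", "@air.exp.f32"), ("@llvm.log.f32", "@air.log.f32"),
   ("@llvm.sin.f32", "@air.sin.f32"), ("@llvm.cos.f32", "@air.cos.f32"),
   ("@llvm.sqrt.f32", "@air.sqrt.f32"), ("@llvm.ceil.f32", "@air.ceil.f32"),
   ("@llvm.floor.f32", "@air.floor.f32"), ("@llvm.fabs.f32", "@air.fabs.f32"),
   ("@llvm.pow.f32", "@air.pow.f32"), ("@llvm.tanh.f32", "@air.tanh.f32"),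
   ("@llvm.fma.f32", "@air.fma.f32"), ("@llvm.trunc.f32", "@air.trunc.f32"),
   ("@llvm.round.f32", "@air.round.f32"),
   ("@llvm.minnum.f32", "@air.fmin.f32"), ("@llvm.maxnum.f32", "@air.fmax.f32")]

-- the compiled alternation of the (dot-escaped) literal keys, as character lists
def pvAirKeysChars : List (List Char × List Char) :=
  pvAirTable.map (fun kv => (kv.1.toList, kv.2.toList))

-- _RX.sub: one left-to-right pass over the line; at each position the first alternative that
-- matches is replaced by its air name and the scan resumes after it, else the char is copied
def pvScan : List Char → List Char
  | [] => []
  | c :: rest =>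
    match pvAirKeysChars.find? (fun kv => kv.1.isPrefixOf (c :: rest)) with
    | some kv => kv.2 ++ pvScan (List.drop (kv.1.length - 1) rest)
    | none => c :: pvScan rest
termination_by s => s.length
decreasing_by
  · simp only [List.length_cons, List.length_drop]; omega
  · simp

def replace_intrinsics_py_alt (line : String) : String × List String :=
  if !(PySem.Str.isIn "call" line) then (line, PySem.Set.empty)
  else
    let used := pvAirTable.foldl (fun (u : PySem.Set String) kv =>
      if PySem.Str.isIn kv.1 line then PySem.Set.add u kv.2 else u) PySem.Set.empty
    (String.ofList (pvScan line.toList), used)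

-- ===== PRECONDITION & SPEC =====
def Spec_replace_intrinsics_py (line : String) (out : String × List String) : Prop := out = replace_intrinsics_py_alt line
instance (line : String) (out : String × List String) : Decidable (Spec_replace_intrinsics_py line out) := by unfold Spec_replace_intrinsics_py; infer_instance

-- ===== CLAIM (what is proved, stated in full; the proofs are below) =====
def Claim_equal_replace_intrinsics_py : Prop := ∀ (line : String), Dom_replace_intrinsics_py line → Spec_replace_intrinsics_py line (replace_intrinsics_py line)

-- ===== LEMMAS AND PROOFS =====
def pvRepC (old new : List Char) : List Char → List Char
  | [] => []
  | c :: t =>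
    if old.isPrefixOf (c :: t) then new ++ pvRepC old new (List.drop (old.length - 1) t)
    else c :: pvRepC old new t
termination_by s => s.length
decreasing_by
  · simp only [List.length_cons, List.length_drop]; omega
  · simp

theorem pvGoSpec (old new : List Char) (hne : old ≠ []) :
    ∀ fuel (l acc : List Char), l.length ≤ fuel →
      PySem.Chars.replace.go old new fuel l acc = acc.reverse ++ pvRepC old new l := by
  intro fuel
  induction fuel with
  | zero =>
      intro l acc hl
      have : l = [] := by cases l <;> simp_all
      subst this
      simp [PySem.Chars.replace.go, pvRepC]
  | succ n ih =>
      intro l acc hl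
      cases l with
      | nil => simp [PySem.Chars.replace.go, pvRepC]
      | cons c t =>
          by_cases hp : old.isPrefixOf (c :: t)
          · rw [PySem.Chars.replace.go]
            simp only [hp, if_pos]
            obtain ⟨m, hm⟩ : ∃ m, old.length = m + 1 := by
              cases old with | nil => exact absurd rfl hne | cons a b => exact ⟨b.length, rfl⟩
            have hdrop : List.drop old.length (c :: t) = List.drop (old.length - 1) t := by
              rw [hm]; simp
            have hl' : t.length ≤ n := by simp at hl; omega
            rw [hdrop, ih _ _ (by simp only [List.length_drop]; omega)]
            rw [pvRepC]
            simp [hp]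
          · rw [PySem.Chars.replace.go]
            simp only [hp]
            have hl' : t.length ≤ n := by simp at hl; omega
            rw [ih _ _ hl']
            rw [pvRepC]
            simp [hp]

theorem pvReplace_eq_repC (old new s : List Char) (hne : old ≠ []) :
    PySem.Chars.replace s old new = pvRepC old new s := by
  rw [PySem.Chars.replace]
  have : old.isEmpty = false := by cases old <;> simp_all
  rw [this]
  simpa using pvGoSpec old new hne s.length s [] le_rfl


def pvTok (x : Char) (l : List Char) : Bool :=
  match l with
  | a :: b :: w => a == '@' && b == x && !((b :: w).contains '@')
  | _ => false

theorem pvTok_shape {x : Char} {l : List Char} (h : pvTok x l = true) :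
    ∃ w, l = '@' :: x :: w ∧ ('@' ∉ (x :: w)) := by
  cases l with
  | nil => simp [pvTok] at h
  | cons a t =>
    cases t with
    | nil => simp [pvTok] at h
    | cons b w =>
        simp only [pvTok, Bool.and_eq_true, beq_iff_eq, Bool.not_eq_true'] at h
        obtain ⟨⟨rfl, rfl⟩, h2⟩ := h
        exact ⟨w, rfl, by simpa using h2⟩

theorem pvTok_nonpref {K v : List Char} (hK : pvTok 'l' K = true) (hv : pvTok 'a' v = true) :
    ¬ K <+: v ∧ ¬ v <+: K := by
  obtain ⟨w, rfl, -⟩ := pvTok_shape hK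
  obtain ⟨w', rfl, -⟩ := pvTok_shape hv
  constructor <;> · intro h; simp [List.prefix_cons_iff] at h

theorem pvInfix_run {K : List Char} (x : Char) (hK : pvTok x K = true) :
    ∀ (w Y : List Char), ('@' ∉ w) → K <:+: w ++ Y → K <:+: Y := by
  obtain ⟨u, rfl, -⟩ := pvTok_shape hK
  intro w
  induction w with
  | nil => intro Y _ h; simpa using h
  | cons c w ih =>
      intro Y hc h
      rw [List.cons_append, List.infix_cons_iff] at h
      rcases h with h | h
      · rw [List.prefix_cons_iff] at h
        rcases h with h | ⟨t, ht, -⟩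
        · simp at h
        · exfalso
          have hc' : c = '@' := by
            have := congrArg (List.head? ·) ht
            simpa using this.symm
          exact hc (hc' ▸ List.mem_cons_self ..)
      · exact ih Y (fun hm => hc (List.mem_cons_of_mem _ hm)) h

theorem pvInfix_pass {K p : List Char} (x : Char) (hK : pvTok 'l' K = true)
    (hp : pvTok x p = true) (hKp : ¬ K <+: p) (hpK : ¬ p <+: K) :
    ∀ (Y : List Char), K <:+: p ++ Y → K <:+: Y := by
  intro Y h
  obtain ⟨w, hpe, hw⟩ := pvTok_shape hp
  subst hpe
  rw [List.cons_append, List.infix_cons_iff] at h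
  rcases h with h | h
  · exfalso
    have hself : ('@' :: x :: w) <+: ('@' :: (x :: w ++ Y)) := by
      simp
    rcases List.prefix_or_prefix_of_prefix h hself with h' | h'
    · exact hKp h'
    · exact hpK h'
  · exact pvInfix_run 'l' hK (x :: w) Y hw (by simpa using h)
theorem pvPrefix_decomp {k : List Char} (hne : k ≠ []) {c : Char} {t : List Char}
    (hp : k.isPrefixOf (c :: t) = true) :
    c :: t = k ++ List.drop (k.length - 1) t := by
  obtain ⟨r, hr⟩ := List.isPrefixOf_iff_prefix.mp hp
  obtain ⟨m, hm⟩ : ∃ m, k.length = m + 1 := by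
    cases k with | nil => exact absurd rfl hne | cons a b => exact ⟨b.length, rfl⟩
  have hdrop : List.drop (k.length - 1) t = List.drop k.length (c :: t) := by rw [hm]; simp
  rw [hdrop, ← hr, List.drop_left]

theorem pvDrop_head {K : List Char} {x : Char} (hK : pvTok x K = true) {j : Nat}
    (h1 : 1 ≤ j) (h2 : j < K.length) :
    ∃ a u, K.drop j = a :: u ∧ a ≠ '@' := by
  cases hd : K.drop j with
  | nil =>
      exfalso
      have := congrArg List.length hd
      simp at this; omega
  | cons a u =>
      refine ⟨a, u, rfl, ?_⟩
      obtain ⟨w, hKe, hKw⟩ := pvTok_shape hK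
      intro hEq
      have ha : a ∈ K.drop j := by rw [hd]; exact List.mem_cons_self ..
      have : a ∈ List.drop (j - 1) (x :: w) := by
        have : K.drop j = List.drop (j - 1) (x :: w) := by
          rw [hKe]
          have : j = (j - 1) + 1 := by omega
          rw [this]
          simp
        rwa [this] at ha
      have : a ∈ x :: w := List.mem_of_mem_drop this
      rw [hEq] at this
      exact hKw this

-- occurrences of a token are never created by replacing another token
theorem pvLp_fwd {K k v : List Char} (hK : pvTok 'l' K = true)
    (hv : pvTok 'a' v = true) :
    ∀ (s : List Char) (j : Nat), j < K.length →
      K.drop j <+: pvRepC k v s → K.drop j <+: s := by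
  intro s
  induction s using pvRepC.induct k with
  | case1 => intro j hj h; simpa [pvRepC] using h
  | case2 c t hp ih =>
      intro j hj h
      rw [pvRepC, if_pos hp] at h
      exfalso
      obtain ⟨wv, hve, hvw⟩ := pvTok_shape hv
      rcases Nat.eq_zero_or_pos j with rfl | hj1
      · obtain ⟨w, hKe, -⟩ := pvTok_shape hK
        rw [List.drop_zero, hKe, hve, List.cons_append, List.cons_append,
          List.cons_prefix_cons, List.cons_prefix_cons] at h
        exact absurd h.2.1 (by decide)
      · obtain ⟨a, u, hd, ha⟩ := pvDrop_head hK hj1 hj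
        rw [hd, hve, List.cons_append, List.cons_prefix_cons] at h
        exact ha h.1
  | case3 c t hnp ih =>
      intro j hj h
      rw [pvRepC, if_neg hnp] at h
      cases hd : K.drop j with
      | nil => exact List.nil_prefix
      | cons a u =>
          rw [hd] at h
          rw [List.cons_prefix_cons] at h ⊢
          refine ⟨h.1, ?_⟩
          have hu : u = K.drop (j + 1) := by
            rw [← List.tail_drop, hd]; rfl
          by_cases hj2 : j + 1 < K.length
          · rw [hu]
            exact ih (j + 1) hj2 (hu ▸ h.2)
          · have : u = [] := by
              rw [hu, List.drop_eq_nil_iff]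
              omega
            rw [this]
            exact List.nil_prefix
  -- termination of induct instantiation is automatic

-- occurrences of a distinct token survive replacing another token
theorem pvLp_bwd {K k v : List Char} (hK : pvTok 'l' K = true) (hk : pvTok 'l' k = true)
    (hKk : ¬ K <+: k) (hkK : ¬ k <+: K) :
    ∀ (s : List Char) (j : Nat), j < K.length →
      K.drop j <+: s → K.drop j <+: pvRepC k v s := by
  intro s
  induction s using pvRepC.induct k with
  | case1 => intro j hj h; simpa [pvRepC] using h
  | case2 c t hp ih =>
      intro j hj h
      exfalso
      obtain ⟨wk, hke, hkw⟩ := pvTok_shape hk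
      have hdec := pvPrefix_decomp (by rw [hke]; simp) hp
      rcases Nat.eq_zero_or_pos j with rfl | hj1
      · rw [List.drop_zero] at h
        have hself : k <+: (c :: t) := List.isPrefixOf_iff_prefix.mp hp
        rcases List.prefix_or_prefix_of_prefix h hself with h' | h'
        · exact hKk h'
        · exact hkK h'
      · obtain ⟨a, u, hd, ha⟩ := pvDrop_head hK hj1 hj
        rw [hd] at h
        have hc : c = '@' := by
          have := congrArg List.head? hdec
          rw [hke] at this
          simpa using this
        rw [hc, List.cons_prefix_cons] at h
        exact ha h.1
  | case3 c t hnp ih =>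
      intro j hj h
      rw [pvRepC, if_neg hnp]
      cases hd : K.drop j with
      | nil => exact List.nil_prefix
      | cons a u =>
          rw [hd] at h
          rw [List.cons_prefix_cons] at h ⊢
          refine ⟨h.1, ?_⟩
          have hu : u = K.drop (j + 1) := by rw [← List.tail_drop, hd]; rfl
          by_cases hj2 : j + 1 < K.length
          · rw [hu]
            exact ih (j + 1) hj2 (hu ▸ h.2)
          · have : u = [] := by rw [hu, List.drop_eq_nil_iff]; omega
            rw [this]
            exact List.nil_prefix
theorem pvL_fwd {K k v : List Char} (hK : pvTok 'l' K = true) (hk : pvTok 'l' k = true)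
    (hv : pvTok 'a' v = true) :
    ∀ (s : List Char), K <:+: pvRepC k v s → K <:+: s := by
  intro s
  induction s using pvRepC.induct k with
  | case1 => intro h; simpa [pvRepC] using h
  | case2 c t hp ih =>
      intro h
      rw [pvRepC, if_pos hp] at h
      obtain ⟨hKv, hvK⟩ := pvTok_nonpref hK hv
      have h1 : K <:+: pvRepC k v (List.drop (k.length - 1) t) :=
        pvInfix_pass 'a' hK hv hKv hvK _ h
      have h2 := ih h1
      rw [pvPrefix_decomp (by obtain ⟨w, hke, -⟩ := pvTok_shape hk; rw [hke]; simp) hp]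
      exact h2.trans List.infix_append_right
  | case3 c t hnp ih =>
      intro h
      rw [pvRepC, if_neg hnp] at h
      rw [List.infix_cons_iff] at h ⊢
      rcases h with h | h
      · obtain ⟨w, hKe, -⟩ := pvTok_shape hK
        exact Or.inl (by
          have := pvLp_fwd hK hv (c :: t) 0 (by rw [hKe]; simp) (by
            rw [List.drop_zero, pvRepC, if_neg hnp]; exact h)
          simpa using this)
      · exact Or.inr (ih h)

theorem pvL_bwd {K k v : List Char} (hK : pvTok 'l' K = true) (hk : pvTok 'l' k = true)
    (hKk : ¬ K <+: k) (hkK : ¬ k <+: K) :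
    ∀ (s : List Char), K <:+: s → K <:+: pvRepC k v s := by
  intro s
  induction s using pvRepC.induct k with
  | case1 => intro h; simpa [pvRepC] using h
  | case2 c t hp ih =>
      intro h
      rw [pvRepC, if_pos hp]
      rw [pvPrefix_decomp (by obtain ⟨w, hke, -⟩ := pvTok_shape hk; rw [hke]; simp) hp] at h
      have h1 : K <:+: List.drop (k.length - 1) t := pvInfix_pass 'l' hK hk hKk hkK _ h
      exact (ih h1).trans List.infix_append_right
  | case3 c t hnp ih =>
      intro h
      rw [pvRepC, if_neg hnp]
      rw [List.infix_cons_iff] at h ⊢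
      rcases h with h | h
      · obtain ⟨w, hKe, -⟩ := pvTok_shape hK
        refine Or.inl ?_
        have := pvLp_bwd (v := v) hK hk hKk hkK (c :: t) 0 (by rw [hKe]; simp) (by simpa using h)
        rw [pvRepC, if_neg hnp] at this
        simpa using this
      · exact Or.inr (ih h)

theorem pvIsIn_rep {K k v : List Char} (hK : pvTok 'l' K = true) (hk : pvTok 'l' k = true)
    (hv : pvTok 'a' v = true) (hKk : ¬ K <+: k) (hkK : ¬ k <+: K) (s : List Char) :
    PySem.Chars.isIn K (pvRepC k v s) = PySem.Chars.isIn K s := by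
  rw [Bool.eq_iff_iff, PySem.Chars.isIn_iff_infix, PySem.Chars.isIn_iff_infix]
  exact ⟨pvL_fwd hK hk hv s, pvL_bwd hK hk hKk hkK s⟩

theorem pvNorep {k v : List Char} : ∀ (s : List Char), ¬ (k <:+: s) → pvRepC k v s = s := by
  intro s
  induction s using pvRepC.induct k with
  | case1 => intro _; rw [pvRepC]
  | case2 c t hp ih =>
      intro h
      exact absurd ((List.isPrefixOf_iff_prefix.mp hp).isInfix) h
  | case3 c t hnp ih =>
      intro h
      rw [pvRepC, if_neg hnp, ih (fun hi => h (List.infix_cons_iff.mpr (Or.inr hi)))]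
theorem pvSelfstep {k : List Char} (v : List Char) (hk : k ≠ []) (r : List Char) :
    pvRepC k v (k ++ r) = v ++ pvRepC k v r := by
  obtain ⟨c, t, rfl⟩ : ∃ c t, k = c :: t := by
    cases k with | nil => exact absurd rfl hk | cons a b => exact ⟨a, b, rfl⟩
  rw [List.cons_append, pvRepC, if_pos (by
    exact List.isPrefixOf_iff_prefix.mpr (by simp))]
  congr 1
  simp

theorem pvRun_factor {k v : List Char} (hk : k.head? = some '@') :
    ∀ (p r : List Char), ('@' ∉ p) → pvRepC k v (p ++ r) = p ++ pvRepC k v r := by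
  intro p
  induction p with
  | nil => intro r _; simp
  | cons c p ih =>
      intro r hc
      rw [List.cons_append, pvRepC, if_neg (by
        intro hpre
        obtain ⟨a, k', rfl⟩ : ∃ a k', k = a :: k' := by
          cases k with | nil => simp at hk | cons a b => exact ⟨a, b, rfl⟩
        have ha : a = '@' := by simpa using hk
        rw [List.isPrefixOf_iff_prefix, List.cons_prefix_cons] at hpre
        exact hc (by rw [← hpre.1, ha]; exact List.mem_cons_self ..)), ih r (fun hm => hc (List.mem_cons_of_mem _ hm))]
      simp

theorem pvAt_factor {k v p : List Char} (x : Char) (hk : pvTok 'l' k = true)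
    (hp : pvTok x p = true) (h1 : ¬ k <+: p) (h2 : ¬ p <+: k) (r : List Char) :
    pvRepC k v (p ++ r) = p ++ pvRepC k v r := by
  obtain ⟨w, rfl, hw⟩ := pvTok_shape hp
  rw [List.cons_append, pvRepC, if_neg (by
    rw [List.isPrefixOf_iff_prefix]
    intro hpre
    have hself : ('@' :: x :: w) <+: ('@' :: (x :: w ++ r)) := by simp
    rcases List.prefix_or_prefix_of_prefix hpre hself with h' | h'
    · exact h1 h'
    · exact h2 h')]
  have : pvRepC k v (x :: w ++ r) = (x :: w) ++ pvRepC k v r := by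
    apply pvRun_factor
    · obtain ⟨u, rfl, -⟩ := pvTok_shape hk; rfl
    · simpa using hw
  rw [this]
  simp
def pvKeyC (kv : String × String) : List Char := kv.1.toList
def pvValC (kv : String × String) : List Char := kv.2.toList
def pvStepL (l : List Char) (kv : String × String) : List Char := pvRepC (pvKeyC kv) (pvValC kv) l
def pvStepU (s0 : List Char) (u : PySem.Set String) (kv : String × String) : PySem.Set String :=
  if PySem.Chars.isIn (pvKeyC kv) s0 then PySem.Set.add u kv.2 else u
def pvStepA (st : List Char × PySem.Set String) (kv : String × String) :
    List Char × PySem.Set String :=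
  if PySem.Chars.isIn (pvKeyC kv) st.1 then
    (pvRepC (pvKeyC kv) (pvValC kv) st.1, PySem.Set.add st.2 kv.2)
  else st
def pvOK (T : List (String × String)) : Prop :=
  (∀ kv ∈ T, pvTok 'l' (pvKeyC kv) = true ∧ pvTok 'a' (pvValC kv) = true) ∧
  List.Pairwise (fun kv kv' => ¬ pvKeyC kv <+: pvKeyC kv' ∧ ¬ pvKeyC kv' <+: pvKeyC kv) T

theorem pvOK_table : pvOK pvAirTable := by
  constructor
  · decide
  · decide

theorem pvOK_cons {e : String × String} {T : List (String × String)} (h : pvOK (e :: T)) :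
    pvOK T ∧ (pvTok 'l' (pvKeyC e) = true ∧ pvTok 'a' (pvValC e) = true) ∧
      (∀ e' ∈ T, ¬ pvKeyC e <+: pvKeyC e' ∧ ¬ pvKeyC e' <+: pvKeyC e) := by
  obtain ⟨h1, h2⟩ := h
  rw [List.pairwise_cons] at h2
  exact ⟨⟨fun kv hkv => h1 kv (List.mem_cons_of_mem _ hkv), h2.2⟩,
    h1 e (List.mem_cons_self ..), h2.1⟩

theorem pvUsedCongr {T : List (String × String)} {s1 s2 : List Char}
    (h : ∀ kv ∈ T, PySem.Chars.isIn (pvKeyC kv) s1 = PySem.Chars.isIn (pvKeyC kv) s2) :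
    ∀ u, T.foldl (pvStepU s1) u = T.foldl (pvStepU s2) u := by
  induction T with
  | nil => intro u; rfl
  | cons e T ih =>
      intro u
      simp only [List.foldl_cons]
      rw [show pvStepU s1 u e = pvStepU s2 u e by
        unfold pvStepU; rw [h e (List.mem_cons_self ..)]]
      exact ih (fun kv hkv => h kv (List.mem_cons_of_mem _ hkv)) _

theorem pvMainA {T : List (String × String)} (hT : pvOK T) :
    ∀ (s : List Char) (u : PySem.Set String),
      T.foldl pvStepA (s, u) = (T.foldl pvStepL s, T.foldl (pvStepU s) u) := by
  induction T with
  | nil => intro s u; rfl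
  | cons e T ih =>
      intro s u
      obtain ⟨hT', ⟨hkl, hka⟩, hnp⟩ := pvOK_cons hT
      simp only [List.foldl_cons]
      have hline : (pvStepA (s, u) e).1 = pvStepL s e := by
        unfold pvStepA pvStepL
        by_cases hin : PySem.Chars.isIn (pvKeyC e) s = true
        · rw [if_pos hin]
        · rw [if_neg hin]
          exact (pvNorep s (fun hinf => hin ((PySem.Chars.isIn_iff_infix _ _).mpr hinf))).symm
      have hused : (pvStepA (s, u) e).2 = pvStepU s u e := by
        unfold pvStepA pvStepU
        by_cases hin : PySem.Chars.isIn (pvKeyC e) s = true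
        · rw [if_pos hin, if_pos hin]
        · rw [if_neg hin, if_neg hin]
      have hst : pvStepA (s, u) e = (pvStepL s e, pvStepU s u e) := by
        rw [← hline, ← hused]
      rw [hst, ih hT']
      congr 1
      have : ∀ kv ∈ T, PySem.Chars.isIn (pvKeyC kv) (pvStepL s e) = PySem.Chars.isIn (pvKeyC kv) s := by
        intro kv hkv
        obtain ⟨hkl', -⟩ := hT'.1 kv hkv
        exact pvIsIn_rep hkl' hkl hka (hnp kv hkv).2 (hnp kv hkv).1 s
      exact pvUsedCongr this _
theorem pvFoldL_nil : ∀ (T : List (String × String)), (∀ kv ∈ T, pvKeyC kv ≠ []) →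
    T.foldl pvStepL [] = [] := by
  intro T
  induction T with
  | nil => intro _; rfl
  | cons e T ih =>
      intro h
      simp only [List.foldl_cons]
      rw [show pvStepL [] e = [] by unfold pvStepL; rw [pvRepC]]
      exact ih (fun kv hkv => h kv (List.mem_cons_of_mem _ hkv))

theorem pvFoldL_factor {p : List Char} : ∀ (T : List (String × String)),
    (∀ kv ∈ T, ∀ r, pvRepC (pvKeyC kv) (pvValC kv) (p ++ r) = p ++ pvRepC (pvKeyC kv) (pvValC kv) r) →
    ∀ r, T.foldl pvStepL (p ++ r) = p ++ T.foldl pvStepL r := by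
  intro T
  induction T with
  | nil => intro _ r; rfl
  | cons e T ih =>
      intro h r
      simp only [List.foldl_cons]
      rw [show pvStepL (p ++ r) e = p ++ pvStepL r e from h e (List.mem_cons_self ..) r]
      exact ih (fun kv hkv => h kv (List.mem_cons_of_mem _ hkv)) _

theorem pvFoldL_head {c : Char} : ∀ (T : List (String × String)), pvOK T →
    ∀ (t : List Char), (∀ kv ∈ T, ¬ pvKeyC kv <+: (c :: t)) →
      T.foldl pvStepL (c :: t) = c :: T.foldl pvStepL t := by
  intro T
  induction T with
  | nil => intro _ t _; rfl
  | cons e T ih =>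
      intro hOK t h
      obtain ⟨hT', ⟨hkl, hka⟩, hnp⟩ := pvOK_cons hOK
      simp only [List.foldl_cons]
      have hstep : pvStepL (c :: t) e = c :: pvRepC (pvKeyC e) (pvValC e) t := by
        unfold pvStepL
        rw [pvRepC, if_neg (by
          rw [List.isPrefixOf_iff_prefix]
          exact h e (List.mem_cons_self ..))]
      rw [hstep]
      refine ih hT' _ ?_
      intro kv hkv hpre
      obtain ⟨hkl', -⟩ := hT'.1 kv hkv
      have := pvLp_fwd (K := pvKeyC kv) (k := pvKeyC e) (v := pvValC e) hkl' hka (c :: t) 0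
        (by obtain ⟨w, hke, -⟩ := pvTok_shape hkl'; rw [hke]; simp)
        (by
          rw [List.drop_zero, pvRepC, if_neg (by
            rw [List.isPrefixOf_iff_prefix]
            exact h e (List.mem_cons_self ..))]
          exact hpre)
      exact h kv (List.mem_cons_of_mem _ hkv) (by simpa using this)

theorem pvScan_eq : ∀ (n : Nat) (s : List Char), s.length ≤ n →
    pvAirTable.foldl pvStepL s = pvScan s := by
  intro n
  induction n with
  | zero =>
      intro s hs
      have : s = [] := by cases s <;> simp_all
      subst this
      rw [pvFoldL_nil pvAirTable (by decide), pvScan]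
  | succ n ih =>
      intro s hs
      cases s with
      | nil => rw [pvFoldL_nil pvAirTable (by decide), pvScan]
      | cons c t =>
          rw [pvScan]
          have hmap : pvAirKeysChars.find? (fun kv => kv.1.isPrefixOf (c :: t))
              = (pvAirTable.find? (fun kv => (pvKeyC kv).isPrefixOf (c :: t))).map
                  (fun kv => (kv.1.toList, kv.2.toList)) := by
            rw [pvAirKeysChars, List.find?_map]
            rfl
          cases hfind : pvAirTable.find? (fun kv => (pvKeyC kv).isPrefixOf (c :: t)) with
          | none =>
              rw [hmap, hfind]
              simp only [Option.map_none]
              have hAll := List.find?_eq_none.mp hfind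
              rw [pvFoldL_head pvAirTable pvOK_table t (fun kv hkv hpre =>
                (by simpa using hAll kv hkv (List.isPrefixOf_iff_prefix.mpr hpre) : False))]
              rw [ih t (by simpa using Nat.lt_succ_iff.mp (by simpa using hs))]
          | some e =>
              rw [hmap, hfind]
              simp only [Option.map_some]
              -- split the table at the first matching entry
              obtain ⟨hpe, T1, T2, hsplit, hbefore⟩ := List.find?_eq_some_iff_append.mp hfind
              have hOK := pvOK_table
              rw [hsplit] at hOK ⊢
              obtain ⟨hAllOK, hPW⟩ := hOK
              have hkeyTok : ∀ kv ∈ T1 ++ e :: T2, pvTok 'l' (pvKeyC kv) = true :=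
                fun kv hkv => (hAllOK kv hkv).1
              have heTok := hAllOK e (by simp)
              -- decompose s = key e ++ rest
              have hkne : pvKeyC e ≠ [] := by
                obtain ⟨w, hke, -⟩ := pvTok_shape heTok.1; rw [hke]; simp
              have hdec := pvPrefix_decomp hkne hpe
              set rest := List.drop ((pvKeyC e).length - 1) t with hrest
              -- factor the fold over T1 through the key prefix
              have hfac1 : ∀ kv ∈ T1, ∀ r,
                  pvRepC (pvKeyC kv) (pvValC kv) (pvKeyC e ++ r)
                    = pvKeyC e ++ pvRepC (pvKeyC kv) (pvValC kv) r := by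
                intro kv hkv r
                have hnp : ¬ pvKeyC kv <+: pvKeyC e ∧ ¬ pvKeyC e <+: pvKeyC kv := by
                  rw [List.pairwise_append] at hPW
                  exact hPW.2.2 kv hkv e (by simp)
                exact pvAt_factor 'l' (hkeyTok kv (List.mem_append_left _ hkv)) heTok.1
                  hnp.1 hnp.2 r
              have hfacv : ∀ kv ∈ T2, ∀ r,
                  pvRepC (pvKeyC kv) (pvValC kv) (pvValC e ++ r)
                    = pvValC e ++ pvRepC (pvKeyC kv) (pvValC kv) r := by
                intro kv hkv r
                have hkvTok := hkeyTok kv (by simp [hkv])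
                have hnp := pvTok_nonpref hkvTok heTok.2
                exact pvAt_factor 'a' hkvTok heTok.2 hnp.1 hnp.2 r
              calc (T1 ++ e :: T2).foldl pvStepL (c :: t)
                  = (e :: T2).foldl pvStepL (T1.foldl pvStepL (c :: t)) := by
                    rw [List.foldl_append]
                _ = (e :: T2).foldl pvStepL (pvKeyC e ++ T1.foldl pvStepL rest) := by
                    rw [show (c :: t) = pvKeyC e ++ rest from hdec,
                      pvFoldL_factor T1 hfac1]
                _ = T2.foldl pvStepL (pvValC e ++ pvRepC (pvKeyC e) (pvValC e) (T1.foldl pvStepL rest)) := by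
                    simp only [List.foldl_cons]
                    rw [show pvStepL (pvKeyC e ++ T1.foldl pvStepL rest) e
                        = pvValC e ++ pvRepC (pvKeyC e) (pvValC e) (T1.foldl pvStepL rest) from
                      pvSelfstep _ hkne _]
                _ = pvValC e ++ T2.foldl pvStepL (pvRepC (pvKeyC e) (pvValC e) (T1.foldl pvStepL rest)) := by
                    rw [pvFoldL_factor T2 hfacv]
                _ = pvValC e ++ (T1 ++ e :: T2).foldl pvStepL rest := by
                    rw [List.foldl_append]
                    simp only [List.foldl_cons]
                    rfl
                _ = pvValC e ++ pvScan rest := by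
                    rw [show (T1 ++ e :: T2) = pvAirTable from hsplit.symm]
                    rw [ih rest (by
                      have ht : t.length ≤ n := by simpa using Nat.lt_succ_iff.mp (by simpa using hs)
                      have : rest.length ≤ t.length := by rw [hrest]; simp
                      omega)]
theorem pvStr_isIn_ofList (a : String) (l : List Char) :
    PySem.Str.isIn a (String.ofList l) = PySem.Chars.isIn a.toList l := by
  rw [PySem.Str.isIn, String.toList_ofList]

theorem pvStr_replace_ofList (a b : String) (l : List Char) (hne : a.toList ≠ []) :
    PySem.Str.replace (String.ofList l) a b = String.ofList (pvRepC a.toList b.toList l) := by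
  rw [PySem.Str.replace, String.toList_ofList, pvReplace_eq_repC _ _ _ hne]

theorem pvKey_ne_nil (op : String) : ("@llvm." ++ op ++ ".f32").toList ≠ [] := by
  simp [String.toList_append]

theorem pvBridge_special (kv : String × String) (hk : kv.1.toList ≠ []) (l : List Char)
    (u : PySem.Set String) :
    (if PySem.Str.isIn kv.1 (String.ofList l) then
      (PySem.Str.replace (String.ofList l) kv.1 kv.2, PySem.Set.add u kv.2)
     else (String.ofList l, u))
    = (String.ofList (pvStepA (l, u) kv).1, (pvStepA (l, u) kv).2) := by
  rw [pvStr_isIn_ofList]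
  unfold pvStepA pvKeyC pvValC
  by_cases hin : PySem.Chars.isIn kv.1.toList l = true
  · rw [if_pos hin, if_pos hin, pvStr_replace_ofList _ _ _ hk]
  · rw [if_neg hin, if_neg hin]

theorem pvBridge_ops : ∀ (ops : List String) (l : List Char) (u : PySem.Set String),
    ops.foldl (fun (st : String × PySem.Set String) op =>
      if PySem.Str.isIn ("@llvm." ++ op ++ ".f32") st.1 then
        (PySem.Str.replace st.1 ("@llvm." ++ op ++ ".f32") ("@air." ++ op ++ ".f32"),
          PySem.Set.add st.2 ("@air." ++ op ++ ".f32"))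
      else st) (String.ofList l, u)
    = (String.ofList ((ops.map (fun op => ("@llvm." ++ op ++ ".f32", "@air." ++ op ++ ".f32"))).foldl pvStepA (l, u)).1,
       ((ops.map (fun op => ("@llvm." ++ op ++ ".f32", "@air." ++ op ++ ".f32"))).foldl pvStepA (l, u)).2) := by
  intro ops
  induction ops with
  | nil => intro l u; rfl
  | cons op ops ih =>
      intro l u
      simp only [List.foldl_cons, List.map_cons]
      rw [pvBridge_special ("@llvm." ++ op ++ ".f32", "@air." ++ op ++ ".f32") (pvKey_ne_nil op) l u]
      exact ih _ _
theorem pvTable_split : pvAirTable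
    = (pvMathOpsA.map (fun op => ("@llvm." ++ op ++ ".f32", "@air." ++ op ++ ".f32")))
      ++ [("@llvm.minnum.f32", "@air.fmin.f32"), ("@llvm.maxnum.f32", "@air.fmax.f32")] := by
  decide

theorem pvBridgeA (line : String) (h : PySem.Str.isIn "call" line = true) :
    replace_intrinsics_py line
      = (String.ofList (pvAirTable.foldl pvStepA (line.toList, PySem.Set.empty)).1,
         (pvAirTable.foldl pvStepA (line.toList, PySem.Set.empty)).2) := by
  unfold replace_intrinsics_py
  simp only [h, if_pos]
  rw [pvTable_split, List.foldl_append]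
  simp only [List.foldl_cons, List.foldl_nil]
  rw [show line = String.ofList line.toList from (String.ofList_toList (s := line)).symm]
  rw [String.toList_ofList]
  rw [pvBridge_ops pvMathOpsA line.toList PySem.Set.empty]
  rw [pvBridge_special ("@llvm.minnum.f32", "@air.fmin.f32") (by decide) _ _]
  rw [pvBridge_special ("@llvm.maxnum.f32", "@air.fmax.f32") (by decide) _ _]

-- ===== VERDICT (by name: the statement is the Claim_ definition above) =====
theorem replace_intrinsics_py_spec : Claim_equal_replace_intrinsics_py := by
  unfold Claim_equal_replace_intrinsics_py
  intro line _
  unfold Spec_replace_intrinsics_py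
  unfold replace_intrinsics_py_alt
  cases hc : PySem.Str.isIn "call" line with
  | false =>
      unfold replace_intrinsics_py
      simp only [hc]
      simp
  | true =>
      rw [pvBridgeA line hc]
      simp only [Bool.not_true, Bool.false_eq_true]
      rw [pvMainA pvOK_table]
      rw [pvScan_eq (line.toList.length) _ le_rfl]
      rw [if_neg not_false]
      rfl
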